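-- pv_equiv track=rewrite | github.com/marcosfede/algorithms | googlecodejam/2019/Alien Rhyme/alien_rhyme.py | solve2
-- ===== SOURCE A (Python) =====
-- from collections import defaultdict
--
-- def solve2(words):
--     if len(words) < 2:
--         return 0
--     if len(words) <= 3:
--         return 1
--     d = defaultdict(list)
--     for word in words:
--         if len(word) > 0:
--             d[word[-1]].append(word[:-1])
--     count = 0
--
--     for key,val in d.items():
--         count += solve2(val)
--
--     huerfanos = len(words) - (2* count)
--     if huerfanos > 1:
--         count += 1
--     return count
-- ===== SOURCE B (Python) =====
-- def solve2(words):
--     # Build an explicit suffix trie once (node = [total_count, children dict]),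
--     # then score it with a separate post-order traversal.
--     root = [0, {}]
--     for w in words:
--         node = root
--         node[0] += 1
--         for ch in reversed(w):
--             node = node[1].setdefault(ch, [0, {}])
--             node[0] += 1
--
--     def score(node):
--         total, children = node
--         if total < 2:
--             return 0
--         if total <= 3:
--             return 1
--         c = 0
--         for child in children.values():
--             c += score(child)
--         if total - 2 * c > 1:
--             c += 1
--         return c
--
--     return score(root)
-- ===== Notes on version B (the rewrite author's own statement) =====
-- stated objective: alternative
-- what changed: B materializes the suffix trie once by inserting each reversed word character-by-character (replacing A's per-level defaultdict regrouping and lazy recursion on suffix lists), then computes the answer in a separate post-order traversal over node totals.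
import Mathlib
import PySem

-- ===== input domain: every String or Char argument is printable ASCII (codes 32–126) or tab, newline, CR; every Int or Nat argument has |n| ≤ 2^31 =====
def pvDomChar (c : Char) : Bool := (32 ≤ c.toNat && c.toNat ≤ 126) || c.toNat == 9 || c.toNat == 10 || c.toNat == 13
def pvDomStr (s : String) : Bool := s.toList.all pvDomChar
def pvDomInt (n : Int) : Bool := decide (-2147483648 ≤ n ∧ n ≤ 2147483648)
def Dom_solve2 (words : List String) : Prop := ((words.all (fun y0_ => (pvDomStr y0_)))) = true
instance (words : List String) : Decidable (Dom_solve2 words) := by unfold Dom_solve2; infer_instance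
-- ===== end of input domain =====

-- B replaces A's lazy level-by-level defaultdict regrouping by an eagerly built
-- suffix trie (one insertion pass over the reversed words) followed by a separate
-- post-order scoring traversal; alternative decomposition, same exact result.


-- ===== PORT A =====
-- A-side helpers: the defaultdict(list) grouping loop 'for word in words: if len(word)>0: d[word[-1]].append(word[:-1])'
-- (word[-1] on a nonempty word is List.getLast?, word[:-1] is List.dropLast; strings enter as List Char via String.toList).
def pvDictOf (ws : List (List Char)) : PySem.Dict Char (List (List Char)) :=
  ws.foldl (fun d w =>
    if 0 < w.length then
      match w.getLast? with
      | some c => d.modify c [] (fun v => v ++ [w.dropLast])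
      | none => d
    else d) PySem.Dict.empty

-- proof-side characterisation of pvDictOf, needed here because solve2's decreasing_by cites it
def pvPairs : List (List Char) → List (Char × List Char)
  | [] => []
  | w :: ws =>
    match w.getLast? with
    | some c => (c, w.dropLast) :: pvPairs ws
    | none => pvPairs ws

def pvKeys (ws : List (List Char)) : List Char := (pvPairs ws).map Prod.fst

def pvGrp (ws : List (List Char)) (c : Char) : List (List Char) :=
  ((pvPairs ws).filter (fun p => p.1 == c)).map Prod.snd

def pvSumLen (ws : List (List Char)) : Nat := (ws.map List.length).sum

theorem pvDictOf_aux (ws : List (List Char)) (d : PySem.Dict Char (List (List Char))) :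
    ws.foldl (fun d w =>
      if 0 < w.length then
        match w.getLast? with
        | some c => d.modify c [] (fun v => v ++ [w.dropLast])
        | none => d
      else d) d
    = (pvPairs ws).foldl (fun d p => d.modify p.1 [] (fun v => v ++ [p.2])) d := by
  induction ws generalizing d with
  | nil => rfl
  | cons w ws ih =>
    cases h : w.getLast? with
    | none =>
      have hw : w = [] := List.getLast?_eq_none_iff.mp h
      subst hw
      simp [pvPairs, ih]
    | some c =>
      have hw : w ≠ [] := by intro he; subst he; simp at h
      have hl : 0 < w.length := List.length_pos_iff.mpr hw
      simp only [List.foldl_cons, pvPairs, h, hl, if_pos]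
      exact ih _

theorem pvDictOf_eq_pairs (ws : List (List Char)) :
    pvDictOf ws = (pvPairs ws).foldl (fun d p => d.modify p.1 [] (fun v => v ++ [p.2])) PySem.Dict.empty := by
  rw [pvDictOf]; exact pvDictOf_aux ws _

theorem pvDictOf_items (ws : List (List Char)) :
    (pvDictOf ws).items = (PySem.Set.ofList (pvKeys ws)).map (fun c => (c, pvGrp ws c)) := by
  rw [pvDictOf_eq_pairs]
  have hnd : ((pvPairs ws).foldl (fun d p => d.modify p.1 [] (fun v => v ++ [p.2])) PySem.Dict.empty).keys.Nodup := by
    exact PySem.Dict.nodup_keys_foldl_modify_key (pvPairs ws) Prod.fst [] (fun _ p => (fun v => v ++ [p.2])) PySem.Dict.empty (by simp)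
  rw [PySem.Dict.items_eq_map_keys _ hnd []]
  have hkeys : ((pvPairs ws).foldl (fun d p => d.modify p.1 [] (fun v => v ++ [p.2])) PySem.Dict.empty).keys = PySem.Set.ofList (pvKeys ws) := by
    rw [PySem.Dict.keys_foldl_modify_key (pvPairs ws) Prod.fst [] (fun _ p => (fun v => v ++ [p.2])) PySem.Dict.empty]
    rw [PySem.Dict.keys_empty, PySem.Set.update_nil_left]; rfl
  rw [hkeys]
  apply List.map_congr_left
  intro c _
  rw [PySem.Dict.getD_foldl_modify_append]
  simp [pvGrp, PySem.Dict.getD_empty]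

theorem pvGrp_le (ws : List (List Char)) (c : Char) :
    pvSumLen (pvGrp ws c) + (pvGrp ws c).length ≤ pvSumLen ws := by
  induction ws with
  | nil => exact Nat.le_refl 0
  | cons w ws ih =>
    cases h : w.getLast? with
    | none =>
      have hw : w = [] := List.getLast?_eq_none_iff.mp h
      subst hw
      simpa [pvGrp, pvPairs, pvSumLen] using Nat.le_trans ih (Nat.le_refl _)
    | some c' =>
      have hw : w ≠ [] := by intro he; subst he; simp at h
      have hlen : w.dropLast.length + 1 = w.length := by
        have h1 : (List.dropLast w).length = w.length - 1 := List.length_dropLast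
        have h2 : 0 < w.length := List.length_pos_iff.mpr hw
        omega
      by_cases hcc : (c' == c) = true
      · simp only [pvGrp, pvPairs, h, List.filter_cons, hcc, if_pos, List.map_cons,
          pvSumLen, List.sum_cons, List.length_cons] at ih ⊢
        omega
      · simp only [pvGrp, pvPairs, h, List.filter_cons, hcc, Bool.false_eq_true,
          if_false, pvSumLen, List.map_cons, List.sum_cons] at ih ⊢
        omega

theorem pvGrp_ne_nil {ws : List (List Char)} {c : Char} (h : c ∈ pvKeys ws) :
    pvGrp ws c ≠ [] := by
  intro hnil
  simp only [pvGrp, List.map_eq_nil_iff, List.filter_eq_nil_iff] at hnil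
  obtain ⟨p, hp, hpc⟩ := List.mem_map.mp h
  have := hnil p hp
  simp [hpc] at this

theorem pvGrp_sumLen_lt {ws : List (List Char)} {c : Char} (h : c ∈ pvKeys ws) :
    pvSumLen (pvGrp ws c) < pvSumLen ws := by
  have h1 := pvGrp_le ws c
  have h2 : 0 < (pvGrp ws c).length := List.length_pos_iff.mpr (pvGrp_ne_nil h)
  omega

-- the recursion of A, over words as char lists
def solve2Core (ws : List (List Char)) : Int :=
  if ws.length < 2 then 0
  else if ws.length ≤ 3 then 1
  else
    let d := pvDictOf ws
    let count := d.items.attach.foldl (fun acc kv => acc + solve2Core kv.1.2) 0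
    let huerfanos : Int := (ws.length : Int) - 2 * count
    if huerfanos > 1 then count + 1 else count
termination_by pvSumLen ws
decreasing_by
  rename_i kv
  obtain ⟨⟨k, v⟩, hmem⟩ := kv
  rw [pvDictOf_items] at hmem
  obtain ⟨c, hc, hev⟩ := List.mem_map.1 hmem
  obtain ⟨rfl, rfl⟩ := Prod.mk.injEq .. ▸ hev
  exact pvGrp_sumLen_lt ((PySem.Set.mem_ofList _ _).1 hc)

def solve2 (words : List String) : Int := solve2Core (words.map String.toList)

-- ===== PORT B =====
-- B-side helpers: an explicit trie (node = word count passing through + ordered children),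
-- built by inserting each word over its reversed character order, then scored post-order.
mutual
inductive PvTrie : Type where
  | node : Int → PvChildren → PvTrie
inductive PvChildren : Type where
  | nil : PvChildren
  | cons : Char → PvTrie → PvChildren → PvChildren
end

def pvEmptyTrie : PvTrie := .node 0 .nil

mutual
def pvInsert : PvTrie → List Char → PvTrie
  | .node n ch, [] => .node (n + 1) ch
  | .node n ch, c :: r => .node (n + 1) (pvUpd ch c r)
  termination_by _ w => (w.length, 0, 0)
def pvUpd : PvChildren → Char → List Char → PvChildren
  | .nil, c, r => .cons c (pvInsert pvEmptyTrie r) .nil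
  | .cons c' t rest, c, r =>
    if c' = c then .cons c' (pvInsert t r) rest else .cons c' t (pvUpd rest c r)
  termination_by ch _ r => (r.length, 1, sizeOf ch)
end

mutual
def pvScore : PvTrie → Int
  | .node n ch =>
    if n < 2 then 0
    else if n ≤ 3 then 1
    else
      let c := pvSumCh ch
      if n - 2 * c > 1 then c + 1 else c
def pvSumCh : PvChildren → Int
  | .nil => 0
  | .cons _ t rest => pvScore t + pvSumCh rest
end

def solve2_alt (words : List String) : Int :=
  pvScore (words.foldl (fun t w => pvInsert t w.toList.reverse) pvEmptyTrie)

-- ===== PRECONDITION & SPEC =====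
def Spec_solve2 (words : List String) (out : Int) : Prop := out = solve2_alt words
instance (words : List String) (out : Int) : Decidable (Spec_solve2 words out) := by unfold Spec_solve2; infer_instance

-- ===== CLAIM (what is proved, stated in full; the proofs are below) =====
def Claim_equal_solve2 : Prop := ∀ (words : List String), Dom_solve2 words → Spec_solve2 words (solve2 words)

-- ===== LEMMAS AND PROOFS =====

def pvBuild (rs : List (List Char)) : PvTrie := rs.foldl pvInsert pvEmptyTrie

def pvPairsB : List (List Char) → List (Char × List Char)
  | [] => []
  | [] :: rs => pvPairsB rs
  | (c :: r) :: rs => (c, r) :: pvPairsB rs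

def pvKeysB (rs : List (List Char)) : List Char := (pvPairsB rs).map Prod.fst

def pvGrpB (rs : List (List Char)) (c : Char) : List (List Char) :=
  ((pvPairsB rs).filter (fun p => p.1 == c)).map Prod.snd

def pvOfAssoc : List (Char × PvTrie) → PvChildren
  | [] => .nil
  | (c, t) :: l => .cons c t (pvOfAssoc l)

theorem pvPairsB_append (rs rs' : List (List Char)) :
    pvPairsB (rs ++ rs') = pvPairsB rs ++ pvPairsB rs' := by
  induction rs with
  | nil => rfl
  | cons w rs ih => cases w <;> simp [pvPairsB, ih]

theorem pvKeysB_append_cons (rs : List (List Char)) (c : Char) (r' : List Char) :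
    pvKeysB (rs ++ [c :: r']) = pvKeysB rs ++ [c] := by
  simp [pvKeysB, pvPairsB_append, pvPairsB]

theorem pvGrpB_append_cons (rs : List (List Char)) (c : Char) (r' : List Char) (c'' : Char) :
    pvGrpB (rs ++ [c :: r']) c'' = pvGrpB rs c'' ++ (if c = c'' then [r'] else []) := by
  cases h : c == c'' <;>
    simp_all [pvGrpB, pvPairsB_append, pvPairsB, List.filter_append]

theorem pvGrpB_eq_nil {rs : List (List Char)} {c : Char} (h : c ∉ pvKeysB rs) :
    pvGrpB rs c = [] := by
  simp only [pvGrpB, List.map_eq_nil_iff, List.filter_eq_nil_iff]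
  intro p hp hbe
  exact h (List.mem_map.mpr ⟨p, hp, by simpa using hbe⟩)

theorem pvUpd_notmem (L : List (Char × PvTrie)) (c : Char) (r : List Char)
    (h : c ∉ L.map Prod.fst) :
    pvUpd (pvOfAssoc L) c r = pvOfAssoc (L ++ [(c, pvInsert pvEmptyTrie r)]) := by
  induction L with
  | nil => simp [pvOfAssoc, pvUpd]
  | cons p L ih =>
    obtain ⟨c', t⟩ := p
    simp only [List.map_cons, List.mem_cons] at h
    rw [not_or] at h
    simp only [pvOfAssoc, pvUpd, if_neg (fun he : c' = c => h.1 he.symm), List.cons_append]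
    rw [ih h.2]

theorem pvUpd_mem (L1 L2 : List (Char × PvTrie)) (c : Char) (t : PvTrie) (r : List Char)
    (h : c ∉ L1.map Prod.fst) :
    pvUpd (pvOfAssoc (L1 ++ (c, t) :: L2)) c r = pvOfAssoc (L1 ++ (c, pvInsert t r) :: L2) := by
  induction L1 with
  | nil => simp [pvOfAssoc, pvUpd]
  | cons p L1 ih =>
    obtain ⟨c', t'⟩ := p
    simp only [List.map_cons, List.mem_cons] at h
    rw [not_or] at h
    simp only [List.cons_append, pvOfAssoc, pvUpd, if_neg (fun he : c' = c => h.1 he.symm)]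
    rw [ih h.2]

theorem pvBuild_append_singleton (rs : List (List Char)) (r : List Char) :
    pvBuild (rs ++ [r]) = pvInsert (pvBuild rs) r := by
  simp [pvBuild, List.foldl_append]

theorem pvBuild_char (rs : List (List Char)) :
    pvBuild rs = .node (rs.length : Int)
      (pvOfAssoc ((PySem.Set.ofList (pvKeysB rs)).map (fun c => (c, pvBuild (pvGrpB rs c))))) := by
  induction rs using List.reverseRecOn with
  | nil => rfl
  | append_singleton rs r ih =>
    rw [pvBuild_append_singleton, ih]
    have hlen : ((rs ++ [r]).length : Int) = (rs.length : Int) + 1 := by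
      simp [List.length_append]
    cases r with
    | nil =>
      have hk : pvKeysB (rs ++ [([] : List Char)]) = pvKeysB rs := by
        simp [pvKeysB, pvPairsB_append, pvPairsB]
      have hg : ∀ c, pvGrpB (rs ++ [([] : List Char)]) c = pvGrpB rs c := by
        intro c; simp [pvGrpB, pvPairsB_append, pvPairsB]
      rw [pvInsert, hlen, hk]
      congr 2
      apply List.map_congr_left
      intro c _
      rw [hg]
    | cons c r' =>
      rw [pvInsert, hlen]
      by_cases hc : c ∈ PySem.Set.ofList (pvKeysB rs)
      · obtain ⟨as, bs, hsp⟩ := List.append_of_mem hc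
        have hnd : (PySem.Set.ofList (pvKeysB rs)).Nodup := PySem.Set.nodup_ofList _
        rw [hsp] at hnd
        rw [List.nodup_append] at hnd
        have hcas : c ∉ as := by
          intro hm
          exact hnd.2.2 c hm c (by simp) rfl
        have hcbs : c ∉ bs := by
          have := hnd.2.1
          rw [List.nodup_cons] at this
          exact this.1
        have hk : PySem.Set.ofList (pvKeysB (rs ++ [c :: r'])) = as ++ c :: bs := by
          rw [pvKeysB_append_cons, PySem.Set.ofList_append_singleton,
            PySem.Set.add_of_mem hc, hsp]
        rw [hk, hsp, List.map_append, List.map_cons, List.map_append, List.map_cons]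
        rw [pvUpd_mem _ _ _ _ _ (by simpa using hcas)]
        have e1 : List.map (fun a => (a, pvBuild (pvGrpB (rs ++ [c :: r']) a))) as
            = List.map (fun a => (a, pvBuild (pvGrpB rs a))) as := by
          apply List.map_congr_left
          intro a ha
          have hne : a ≠ c := fun he => hcas (he ▸ ha)
          rw [pvGrpB_append_cons]
          rw [if_neg (fun he : c = a => hne he.symm), List.append_nil]
        have e2 : List.map (fun a => (a, pvBuild (pvGrpB (rs ++ [c :: r']) a))) bs
            = List.map (fun a => (a, pvBuild (pvGrpB rs a))) bs := by
          apply List.map_congr_left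
          intro a ha
          have hne : a ≠ c := fun he => hcbs (he ▸ ha)
          rw [pvGrpB_append_cons]
          rw [if_neg (fun he : c = a => hne he.symm), List.append_nil]
        have e3 : pvBuild (pvGrpB (rs ++ [c :: r']) c) = pvInsert (pvBuild (pvGrpB rs c)) r' := by
          rw [pvGrpB_append_cons, if_pos rfl, pvBuild_append_singleton]
        rw [e1, e2, e3]
      · have hk : PySem.Set.ofList (pvKeysB (rs ++ [c :: r'])) =
            PySem.Set.ofList (pvKeysB rs) ++ [c] := by
          rw [pvKeysB_append_cons, PySem.Set.ofList_append_singleton,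
            PySem.Set.add_of_not_mem hc]
        rw [hk, List.map_append, List.map_cons, List.map_nil]
        rw [pvUpd_notmem _ _ _ (by simpa using hc)]
        have e1 : List.map (fun a => (a, pvBuild (pvGrpB (rs ++ [c :: r']) a)))
              (PySem.Set.ofList (pvKeysB rs))
            = List.map (fun a => (a, pvBuild (pvGrpB rs a))) (PySem.Set.ofList (pvKeysB rs)) := by
          apply List.map_congr_left
          intro a ha
          have hne : a ≠ c := fun he => hc (he ▸ ha)
          rw [pvGrpB_append_cons]
          rw [if_neg (fun he : c = a => hne he.symm), List.append_nil]
        have e3 : pvBuild (pvGrpB (rs ++ [c :: r']) c) = pvInsert pvEmptyTrie r' := by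
          rw [pvGrpB_append_cons, if_pos rfl,
            pvGrpB_eq_nil (fun hm => hc ((PySem.Set.mem_ofList _ _).mpr hm)), List.nil_append]
          rfl
        rw [e1, e3]

theorem pvSumCh_ofAssoc (L : List (Char × PvTrie)) :
    pvSumCh (pvOfAssoc L) = (L.map (fun p => pvScore p.2)).sum := by
  induction L with
  | nil => rfl
  | cons p L ih =>
    obtain ⟨c, t⟩ := p
    simp [pvOfAssoc, pvSumCh, ih]

theorem pvPairsB_map_reverse (ws : List (List Char)) :
    pvPairsB (ws.map List.reverse) = (pvPairs ws).map (fun p => (p.1, p.2.reverse)) := by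
  induction ws with
  | nil => rfl
  | cons w ws ih =>
    rcases hw : w.reverse with _ | ⟨c, r⟩
    · have hw0 : w = [] := by simpa using congrArg List.reverse hw
      subst hw0
      simp [pvPairsB, pvPairs, ih]
    · have hw' : w = r.reverse ++ [c] := by
        have h2 := congrArg List.reverse hw
        simpa using h2
      subst hw'
      simp only [List.map_cons, hw, pvPairsB, pvPairs, List.getLast?_concat,
        List.dropLast_concat, ih, List.map_cons]
      simp

theorem pvCore_eq (ws : List (List Char)) :
    solve2Core ws = pvScore (pvBuild (ws.map List.reverse)) := by
  suffices H : ∀ (n : Nat) (ws : List (List Char)), pvSumLen ws < n →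
      solve2Core ws = pvScore (pvBuild (ws.map List.reverse)) from
    H (pvSumLen ws + 1) ws (Nat.lt_succ_self _)
  intro n
  induction n with
  | zero => intro ws h; omega
  | succ n ih =>
    intro ws hn
    have hB := pvPairsB_map_reverse ws
    have hkeys : pvKeysB (ws.map List.reverse) = pvKeys ws := by
      simp [pvKeysB, pvKeys, hB, List.map_map]
    have hgrp : ∀ c, pvGrpB (ws.map List.reverse) c = (pvGrp ws c).map List.reverse := by
      intro c
      simp only [pvGrpB, pvGrp, hB, List.filter_map, List.map_map]
      rfl
    rw [pvBuild_char, pvScore, solve2Core]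
    simp only [List.length_map, hkeys]
    by_cases h2 : ws.length < 2
    · rw [if_pos h2, if_pos (by exact_mod_cast h2 : (ws.length : Int) < 2)]
    · rw [if_neg h2, if_neg (by exact_mod_cast h2 : ¬ (ws.length : Int) < 2)]
      by_cases h3 : ws.length ≤ 3
      · rw [if_pos h3, if_pos (by exact_mod_cast h3 : (ws.length : Int) ≤ 3)]
      · rw [if_neg h3, if_neg (by exact_mod_cast h3 : ¬ (ws.length : Int) ≤ 3)]
        have hcount :
            (pvDictOf ws).items.attach.foldl (fun acc kv => acc + solve2Core kv.1.2) 0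
            = pvSumCh (pvOfAssoc ((PySem.Set.ofList (pvKeys ws)).map
                (fun c => (c, pvBuild (pvGrpB (ws.map List.reverse) c))))) := by
          rw [List.foldl_attach (f := fun (acc : Int) (kv : Char × List (List Char)) => acc + solve2Core kv.2), PySem.List.foldl_add, pvSumCh_ofAssoc,
            pvDictOf_items, List.map_map, List.map_map]
          rw [Int.zero_add]
          congr 1
          apply List.map_congr_left
          intro c hc
          have hcm : c ∈ pvKeys ws := (PySem.Set.mem_ofList _ _).mp hc
          have hlt : pvSumLen (pvGrp ws c) < n := by
            have := pvGrp_sumLen_lt hcm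
            omega
          simp only [Function.comp_apply]
          rw [hgrp c, ← ih (pvGrp ws c) hlt]
        rw [hcount]

-- ===== VERDICT (by name: the statement is the Claim_ definition above) =====
theorem solve2_spec : Claim_equal_solve2 := by
  intro words _
  unfold Spec_solve2 solve2 solve2_alt
  rw [pvCore_eq]
  congr 1
  show pvBuild _ = _
  rw [pvBuild, List.map_map, List.foldl_map]
  simp [Function.comp]
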